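-- pv_equiv track=rewrite | github.com/akram-side-projects/notebook-mcp | src/notebook_mcp/state_engine.py | _upstream_closure
-- ===== SOURCE A (Python) =====
-- from collections import defaultdict, deque
--
-- def _upstream_closure(focus_cell_id: str, preds: dict[str, set[str]]) -> list[str]:
--     seen: set[str] = set()
--     q: deque[str] = deque([focus_cell_id])
--     ordered: list[str] = []
--
--     while q:
--         cid = q.popleft()
--         if cid in seen:
--             continue
--         seen.add(cid)
--         ordered.append(cid)
--         for p in sorted(preds.get(cid, set())):
--             if p not in seen:
--                 q.append(p)
--
--     # focus last
--     if focus_cell_id in ordered: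
--         ordered.remove(focus_cell_id)
--         ordered.append(focus_cell_id)
--
--     return ordered
-- ===== SOURCE B (Python) =====
-- def _upstream_closure(focus_cell_id: str, preds: dict[str, set[str]]) -> list[str]:
--     # Naive fixed-point iteration: no queue and no seen set. Repeatedly rescan the
--     # whole accumulated list (a snapshot per round), appending each node's sorted
--     # predecessors that are not yet present, until a full round adds nothing.
--     # Each round extends the list by exactly the next BFS level, so the resulting
--     # order coincides with the original BFS discovery order.
--     ordered: list[str] = [focus_cell_id]
--     changed = True
--     while changed:
--         changed = False
--         for node in list(ordered):
--             for p in sorted(preds.get(node, set())):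
--                 if p not in ordered:
--                     ordered.append(p)
--                     changed = True
--     # focus last
--     if focus_cell_id in ordered:
--         ordered.remove(focus_cell_id)
--         ordered.append(focus_cell_id)
--     return ordered
-- ===== Notes on version B (the rewrite author's own statement) =====
-- stated objective: alternative
-- what changed: Replaces A's FIFO-queue BFS with seen-set by a naive fixed-point iteration: repeated full rescans of the accumulated output list (membership tested in the list itself, no queue and no seen set), each round appending exactly the next BFS level until a round adds nothing; the focus-last step is unchanged.
import Mathlib
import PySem

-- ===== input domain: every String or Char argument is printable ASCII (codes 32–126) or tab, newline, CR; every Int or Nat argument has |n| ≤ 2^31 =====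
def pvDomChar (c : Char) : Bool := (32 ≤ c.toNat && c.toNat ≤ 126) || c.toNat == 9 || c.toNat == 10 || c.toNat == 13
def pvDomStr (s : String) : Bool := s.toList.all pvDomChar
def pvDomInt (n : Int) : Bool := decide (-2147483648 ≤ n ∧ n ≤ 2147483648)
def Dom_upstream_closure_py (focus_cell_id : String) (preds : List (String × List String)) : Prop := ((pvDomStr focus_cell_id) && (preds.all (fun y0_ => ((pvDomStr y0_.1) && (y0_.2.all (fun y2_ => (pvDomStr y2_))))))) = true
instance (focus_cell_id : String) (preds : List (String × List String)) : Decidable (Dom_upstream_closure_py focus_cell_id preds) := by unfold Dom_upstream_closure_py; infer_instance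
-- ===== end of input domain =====

-- B replaces A's FIFO BFS (queue + seen set) by a naive fixed-point iteration that
-- repeatedly rescans the accumulated output list until a full round adds nothing;
-- same output, objective: alternative algorithm (no speed claim).

-- ===== shared helpers (dict lookup with default, sorted) =====
-- preds.get(cid, set()) on the association list (first match; Python dict keys are unique)
def pvLookup (preds : List (String × List String)) (cid : String) : List String :=
  match preds with
  | [] => []
  | (k, v) :: rest => if k == cid then v else pvLookup rest cid

-- sorted(preds.get(cid, set()))
def pvSortedPreds (preds : List (String × List String)) (cid : String) : List String :=
  PySem.List.sorted (pvLookup preds cid) (fun x => x) false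

-- universe of node ids ever enqueued: used only as a termination measure
def pvU (focus_cell_id : String) (preds : List (String × List String)) : List String :=
  focus_cell_id :: preds.flatMap (fun kv => kv.2)

-- ===== termination lemmas (cited by the ports' decreasing_by) =====
theorem pv_filter_length_lt {α : Type} (l : List α) (p q : α → Bool)
    (h : ∀ x, q x = true → p x = true) (a : α) (ha : a ∈ l)
    (hpa : p a = true) (hqa : q a = false) :
    (l.filter q).length < (l.filter p).length := by
  induction l with
  | nil => cases ha
  | cons x xs ih =>
    simp only [List.filter_cons]
    rcases List.mem_cons.mp ha with rfl | hxs
    · have hmono := (List.monotone_filter_right xs h).length_le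
      simp [hpa, hqa]
      omega
    · have hlt := ih hxs
      cases hq2 : q x
      · cases hp2 : p x <;> simp [hp2, hq2] <;> omega
      · have hp2 : p x = true := h x hq2
        simp [hp2, hq2]
        omega

theorem pv_seen_grow_lt (U seen d : List String) (x : String)
    (hxd : x ∈ d) (hxU : x ∈ U) (hxs : x ∉ seen) :
    (U.filter fun u => decide (u ∉ seen ++ d)).length <
      (U.filter fun u => decide (u ∉ seen)).length := by
  refine pv_filter_length_lt U (fun u => decide (u ∉ seen)) (fun u => decide (u ∉ seen ++ d))
    ?_ x hxU (by simpa using hxs) (by simp [hxd])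
  intro y hy
  simp only [decide_eq_true_eq, List.mem_append] at hy ⊢
  tauto

theorem pv_seen_add_lt_pre (U seen : List String) (c : String) (hcU : c ∈ U) (hc : c ∉ seen) :
    (U.filter fun u => decide (u ∉ seen ++ [c])).length <
      (U.filter fun u => decide (u ∉ seen)).length :=
  pv_seen_grow_lt U seen [c] c (by simp) hcU hc

theorem pv_set_add_of_not_mem (s : List String) (x : String) (h : x ∉ s) :
    PySem.Set.add s x = s ++ [x] := by
  simp [PySem.Set.add, PySem.Set.contains, h]

theorem pv_seen_add_lt (U seen : List String) (c : String) (hcU : c ∈ U) (hc : c ∉ seen) :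
    (U.filter fun u => decide (u ∉ PySem.Set.add seen c)).length <
      (U.filter fun u => decide (u ∉ seen)).length := by
  have e : PySem.Set.add seen c = seen ++ [c] := pv_set_add_of_not_mem seen c hc
  simpa [e] using pv_seen_add_lt_pre U seen c hcU hc

theorem pv_lookup_subset (preds : List (String × List String)) (cid : String) :
    ∀ x ∈ pvLookup preds cid, x ∈ preds.flatMap (fun kv => kv.2) := by
  induction preds with
  | nil => simp [pvLookup]
  | cons kv rest ih =>
    intro x hx
    obtain ⟨k, v⟩ := kv
    simp only [pvLookup] at hx
    by_cases hk : (k == cid) = true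
    · simp only [hk, if_true] at hx
      exact List.mem_flatMap.mpr ⟨(k, v), List.mem_cons_self .., hx⟩
    · simp only [hk, if_false] at hx
      simp only [List.flatMap_cons]
      exact List.mem_append_right _ (ih x hx)

theorem pv_sortedPreds_subset (preds : List (String × List String)) (cid : String) :
    ∀ x ∈ pvSortedPreds preds cid, x ∈ preds.flatMap (fun kv => kv.2) := by
  intro x hx
  exact pv_lookup_subset preds cid x ((PySem.List.mem_sorted _ _ _ _).mp hx)

-- ===== PORT A ===== (FIFO queue; mark seen + append to ordered at dequeue; unseen sorted preds enqueued)
def pvLoopA (preds : List (String × List String)) (U : List String)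
    (hU : ∀ x ∈ preds.flatMap (fun kv => kv.2), x ∈ U)
    (seen q ordered : List String) (hq : ∀ x ∈ q, x ∈ U) : List String :=
  match q with
  | [] => ordered
  | cid :: rest =>
    if hc : cid ∈ seen then
      pvLoopA preds U hU seen rest ordered (fun x hx => hq x (List.mem_cons_of_mem _ hx))
    else
      let seen' := PySem.Set.add seen cid
      let new := (pvSortedPreds preds cid).filter (fun p => decide (p ∉ seen'))
      pvLoopA preds U hU seen' (rest ++ new) (ordered ++ [cid])
        (by
          intro x hx
          rcases List.mem_append.mp hx with h1 | h1
          · exact hq x (List.mem_cons_of_mem _ h1)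
          · exact hU x (pv_sortedPreds_subset preds cid x (List.mem_of_mem_filter h1)))
  termination_by ((U.filter (fun u => decide (u ∉ seen))).length, q.length)
  decreasing_by
    · exact Prod.Lex.right _ (by simp)
    · exact Prod.Lex.left _ _ (pv_seen_add_lt U seen cid (hq cid (List.mem_cons_self ..)) hc)

def upstream_closure_py (focus_cell_id : String) (preds : List (String × List String)) : List String :=
  let ordered := pvLoopA preds (pvU focus_cell_id preds)
    (fun x hx => List.mem_cons_of_mem _ hx) [] [focus_cell_id] []
    (by intro x hx; simp only [List.mem_singleton] at hx; subst hx; exact List.mem_cons_self ..)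
  if focus_cell_id ∈ ordered then
    (match PySem.List.remove? ordered focus_cell_id with
     | some l => l ++ [focus_cell_id]
     | none => ordered)
  else ordered

-- ===== PORT B ===== (fixed-point iteration: full rescans of the accumulated list)
-- inner 'for p in sorted(...): if p not in ordered: ordered.append(p); changed = True'
def pvScan (live : List String) : List String → List String × Bool
  | [] => (live, false)
  | p :: ps =>
    if p ∈ live then pvScan live ps
    else ((pvScan (live ++ [p]) ps).1, true)

-- middle 'for node in list(ordered)' over the snapshot, threading the live list + changed flag
def pvPass (preds : List (String × List String)) (live : List String) :
    List String → List String × Bool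
  | [] => (live, false)
  | node :: rest =>
    let r1 := pvScan live (pvSortedPreds preds node)
    let r2 := pvPass preds r1.1 rest
    (r2.1, r1.2 || r2.2)

-- specs cited by pvLoopD's decreasing_by
theorem pvScan_spec (ps : List String) : ∀ (live : List String),
    ∃ d, pvScan live ps = (live ++ d, !d.isEmpty) ∧ ∀ x ∈ d, x ∈ ps ∧ x ∉ live := by
  induction ps with
  | nil => intro live; exact ⟨[], by simp [pvScan], by simp⟩
  | cons p ps ih =>
    intro live
    by_cases hp : p ∈ live
    · obtain ⟨d, he, hm⟩ := ih live
      refine ⟨d, by simpa [pvScan, hp] using he, ?_⟩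
      intro x hx
      exact ⟨List.mem_cons_of_mem _ (hm x hx).1, (hm x hx).2⟩
    · obtain ⟨d, he, hm⟩ := ih (live ++ [p])
      refine ⟨p :: d, ?_, ?_⟩
      · simp [pvScan, hp, he]
      · intro x hx
        rcases List.mem_cons.mp hx with rfl | hx'
        · exact ⟨List.mem_cons_self .., hp⟩
        · exact ⟨List.mem_cons_of_mem _ (hm x hx').1,
            fun h => (hm x hx').2 (List.mem_append_left _ h)⟩

theorem pvPass_spec (preds : List (String × List String)) (f : List String) :
    ∀ (live : List String),
    ∃ d, pvPass preds live f = (live ++ d, !d.isEmpty) ∧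
      ∀ x ∈ d, x ∈ preds.flatMap (fun kv => kv.2) ∧ x ∉ live := by
  induction f with
  | nil => intro live; exact ⟨[], by simp [pvPass], by simp⟩
  | cons node rest ih =>
    intro live
    obtain ⟨d1, he1, hm1⟩ := pvScan_spec (pvSortedPreds preds node) live
    obtain ⟨d2, he2, hm2⟩ := ih (live ++ d1)
    refine ⟨d1 ++ d2, ?_, ?_⟩
    · simp only [pvPass, he1, he2]
      cases d1 <;> simp [List.append_assoc]
    · intro x hx
      rcases List.mem_append.mp hx with h1 | h1
      · exact ⟨pv_sortedPreds_subset preds node x (hm1 x h1).1, (hm1 x h1).2⟩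
      · exact ⟨(hm2 x h1).1, fun h => (hm2 x h1).2 (List.mem_append_left _ h)⟩

-- outer 'while changed' loop
def pvLoopD (preds : List (String × List String)) (U : List String)
    (hU : ∀ x ∈ preds.flatMap (fun kv => kv.2), x ∈ U)
    (ordered : List String) : List String :=
  match h : pvPass preds ordered ordered with
  | (o', true) => pvLoopD preds U hU o'
  | (o', false) => o'
  termination_by (U.filter (fun u => decide (u ∉ ordered))).length
  decreasing_by
    obtain ⟨d, he, hm⟩ := pvPass_spec preds ordered ordered
    rw [he] at h
    obtain ⟨h1, h2⟩ := Prod.mk.injEq .. ▸ h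
    rcases d with _ | ⟨y, ys⟩
    · simp at h2
    · subst h1
      exact pv_seen_grow_lt U ordered (y :: ys) y (List.mem_cons_self ..)
        (hU y (hm y (List.mem_cons_self ..)).1) (hm y (List.mem_cons_self ..)).2

def upstream_closure_py_alt (focus_cell_id : String) (preds : List (String × List String)) : List String :=
  let ordered := pvLoopD preds (pvU focus_cell_id preds)
    (fun x hx => List.mem_cons_of_mem _ hx) [focus_cell_id]
  if focus_cell_id ∈ ordered then
    (match PySem.List.remove? ordered focus_cell_id with
     | some l => l ++ [focus_cell_id]
     | none => ordered)
  else ordered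

-- ===== PRECONDITION & SPEC =====
def Spec_upstream_closure_py (focus_cell_id : String) (preds : List (String × List String)) (out : List String) : Prop := out = upstream_closure_py_alt focus_cell_id preds
instance (focus_cell_id : String) (preds : List (String × List String)) (out : List String) : Decidable (Spec_upstream_closure_py focus_cell_id preds out) := by unfold Spec_upstream_closure_py; infer_instance

-- ===== CLAIM (what is proved, stated in full; the proofs are below) =====
def Claim_equal_upstream_closure_py : Prop := ∀ (focus_cell_id : String) (preds : List (String × List String)), Dom_upstream_closure_py focus_cell_id preds → Spec_upstream_closure_py focus_cell_id preds (upstream_closure_py focus_cell_id preds)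

-- ===== LEMMAS AND PROOFS =====

-- proof-side mark-on-enqueue machinery (bridging A's queue to B's fixed-point rounds)
def pvMark (seen : List String) : List String → List String × List String
  | [] => (seen, [])
  | x :: xs =>
    if x ∈ seen then pvMark seen xs
    else
      let r := pvMark (PySem.Set.add seen x) xs
      (r.1, x :: r.2)

theorem pv_mark_fst (seen q : List String) : (pvMark seen q).1 = seen ++ (pvMark seen q).2 := by
  induction q generalizing seen with
  | nil => simp [pvMark]
  | cons x xs ih =>
    by_cases hx : x ∈ seen
    · simpa [pvMark, hx] using ih seen
    · simp only [pvMark, hx, if_false]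
      rw [pv_set_add_of_not_mem seen x hx] at *
      simp [ih (seen ++ [x])]

theorem pv_mark_snd_mem (seen q : List String) :
    ∀ x ∈ (pvMark seen q).2, x ∈ q ∧ x ∉ seen := by
  induction q generalizing seen with
  | nil => simp [pvMark]
  | cons y ys ih =>
    by_cases hy : y ∈ seen
    · intro x hx
      simp only [pvMark, hy, if_true] at hx
      have := ih seen x hx
      exact ⟨List.mem_cons_of_mem _ this.1, this.2⟩
    · intro x hx
      simp only [pvMark, hy, if_false] at hx
      rw [pv_set_add_of_not_mem seen y hy] at hx
      rcases List.mem_cons.mp hx with rfl | hx'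
      · exact ⟨List.mem_cons_self .., hy⟩
      · have := ih (seen ++ [y]) x hx'
        exact ⟨List.mem_cons_of_mem _ this.1, fun h => this.2 (List.mem_append_left _ h)⟩

def pvExpand (preds : List (String × List String)) (seen : List String) :
    List String → List String × List String
  | [] => (seen, [])
  | node :: rest =>
    let r1 := pvMark seen (pvSortedPreds preds node)
    let r2 := pvExpand preds r1.1 rest
    (r2.1, r1.2 ++ r2.2)

theorem pv_expand_fst (preds : List (String × List String)) (seen f : List String) :
    (pvExpand preds seen f).1 = seen ++ (pvExpand preds seen f).2 := by
  induction f generalizing seen with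
  | nil => simp [pvExpand]
  | cons node rest ih =>
    simp only [pvExpand]
    rw [ih, pv_mark_fst]
    simp

theorem pv_expand_snd_mem (preds : List (String × List String)) (seen f : List String) :
    ∀ x ∈ (pvExpand preds seen f).2, x ∈ preds.flatMap (fun kv => kv.2) ∧ x ∉ seen := by
  induction f generalizing seen with
  | nil => simp [pvExpand]
  | cons node rest ih =>
    intro x hx
    simp only [pvExpand] at hx
    rcases List.mem_append.mp hx with h1 | h1
    · have := pv_mark_snd_mem seen _ x h1
      exact ⟨pv_sortedPreds_subset preds node x this.1, this.2⟩
    · have := ih ((pvMark seen (pvSortedPreds preds node)).1) x h1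
      refine ⟨this.1, fun h => this.2 ?_⟩
      rw [pv_mark_fst]; exact List.mem_append_left _ h

-- level-synchronous BFS (mark on enqueue): the middle point between A and B
def pvLoopB (preds : List (String × List String)) (U : List String)
    (hU : ∀ x ∈ preds.flatMap (fun kv => kv.2), x ∈ U)
    (seen frontier ordered : List String) : List String :=
  match frontier with
  | [] => ordered
  | x :: xs =>
    let r := pvExpand preds seen (x :: xs)
    pvLoopB preds U hU r.1 r.2 (ordered ++ r.2)
  termination_by ((U.filter (fun u => decide (u ∉ seen))).length, frontier.length)
  decreasing_by
    rcases hd : (pvExpand preds seen (x :: xs)).2 with _ | ⟨y, ys⟩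
    · have e : (pvExpand preds seen (x :: xs)).1 = seen := by rw [pv_expand_fst, hd]; simp
      simp only [e, hd]
      exact Prod.Lex.right _ (by simp [hd])
    · have e : (pvExpand preds seen (x :: xs)).1 = seen ++ y :: ys := by rw [pv_expand_fst, hd]
      simp only [e, hd]
      apply Prod.Lex.left
      have hy := pv_expand_snd_mem preds seen (x :: xs) y (by rw [hd]; exact List.mem_cons_self ..)
      exact pv_seen_grow_lt U seen (y :: ys) y (List.mem_cons_self ..) (hU y hy.1) hy.2

-- intermediate loop: FIFO queue but mark-on-enqueue (bridges A's queue to levels)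
def pvLoopC (preds : List (String × List String)) (U : List String)
    (hU : ∀ x ∈ preds.flatMap (fun kv => kv.2), x ∈ U)
    (seen q ordered : List String) : List String :=
  match q with
  | [] => ordered
  | c :: rest =>
    let r := pvMark seen (pvSortedPreds preds c)
    pvLoopC preds U hU r.1 (rest ++ r.2) (ordered ++ r.2)
  termination_by ((U.filter (fun u => decide (u ∉ seen))).length, q.length)
  decreasing_by
    rcases hd : (pvMark seen (pvSortedPreds preds c)).2 with _ | ⟨y, ys⟩
    · have e : (pvMark seen (pvSortedPreds preds c)).1 = seen := by rw [pv_mark_fst, hd]; simp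
      simp only [e, hd]
      exact Prod.Lex.right _ (by simp [hd])
    · have e : (pvMark seen (pvSortedPreds preds c)).1 = seen ++ y :: ys := by rw [pv_mark_fst, hd]
      simp only [e, hd]
      apply Prod.Lex.left
      have hy := pv_mark_snd_mem seen (pvSortedPreds preds c) y (by rw [hd]; exact List.mem_cons_self ..)
      exact pv_seen_grow_lt U seen (y :: ys) y (List.mem_cons_self ..)
        (hU y (pv_sortedPreds_subset preds c y hy.1)) hy.2

theorem pv_mark_append (seen a b : List String) :
    pvMark seen (a ++ b) =
      ((pvMark (pvMark seen a).1 b).1, (pvMark seen a).2 ++ (pvMark (pvMark seen a).1 b).2) := by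
  induction a generalizing seen with
  | nil => simp [pvMark]
  | cons x xs ih =>
    by_cases hx : x ∈ seen
    · simp [pvMark, hx, ih]
    · simp [pvMark, hx, ih]

theorem pv_mark_filter (Y ps : List String) :
    ∀ (X : List String), (∀ x ∈ Y, x ∈ X) →
      pvMark X (ps.filter fun p => decide (p ∉ Y)) = pvMark X ps := by
  induction ps with
  | nil => intro X _; simp
  | cons p ps ih =>
    intro X hYX
    simp only [List.filter_cons]
    by_cases hpY : p ∈ Y
    · have hpX : p ∈ X := hYX p hpY
      have hd : (decide ¬p ∈ Y) = false := by simpa using hpY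
      simp only [hd, Bool.false_eq_true, if_false]
      simp [pvMark, hpX]
      simpa using ih X hYX
    · have hd : (decide ¬p ∈ Y) = true := by simpa using hpY
      simp only [hd, if_true]
      simp only [pvMark]
      by_cases hpX : p ∈ X
      · simp only [hpX, if_true]
        exact ih X hYX
      · simp only [hpX, if_false]
        rw [pv_set_add_of_not_mem X p hpX]
        rw [ih (X ++ [p]) (fun x hx => List.mem_append_left _ (hYX x hx))]

-- A's loop equals the mark-on-enqueue loop C on the marked queue
theorem pv_A_eq_C (preds : List (String × List String)) (U : List String)
    (hU : ∀ x ∈ preds.flatMap (fun kv => kv.2), x ∈ U) :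
    ∀ (seen q ordered : List String) (hq : ∀ x ∈ q, x ∈ U),
      pvLoopA preds U hU seen q ordered hq =
        pvLoopC preds U hU (pvMark seen q).1 (pvMark seen q).2 (ordered ++ (pvMark seen q).2) := by
  intro seen q ordered hq
  induction seen, q, ordered, hq using pvLoopA.induct preds U hU with
  | case1 seen ordered hq _ =>
    simp [pvLoopA, pvLoopC, pvMark]
  | case2 seen ordered cid rest hq hc _ ih =>
    simp only [pvLoopA, hc, dif_pos]
    rw [ih]
    simp [pvMark, hc]
  | case3 seen ordered cid rest hq hc seen2 new2 _ ih =>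
    simp only [pvLoopA, hc, dif_neg, not_false_iff]
    rw [ih]
    rw [pv_mark_append (PySem.Set.add seen cid) rest
      ((pvSortedPreds preds cid).filter fun p => decide (p ∉ PySem.Set.add seen cid))]
    rw [pv_mark_filter _ (pvSortedPreds preds cid) _
      (fun x hx => by rw [pv_mark_fst]; exact List.mem_append_left _ hx)]
    have hmr : pvMark seen (cid :: rest) =
        ((pvMark (PySem.Set.add seen cid) rest).1, cid :: (pvMark (PySem.Set.add seen cid) rest).2) := by
      simp [pvMark, hc]
    rw [hmr]
    simp only [pvLoopC]
    simp [List.append_assoc]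

-- unrolling loop C over a whole-level prefix gives pvExpand
theorem pv_C_unroll (preds : List (String × List String)) (U : List String)
    (hU : ∀ x ∈ preds.flatMap (fun kv => kv.2), x ∈ U) :
    ∀ (front seen pending ordered : List String),
      pvLoopC preds U hU seen (front ++ pending) ordered =
        pvLoopC preds U hU (pvExpand preds seen front).1
          (pending ++ (pvExpand preds seen front).2)
          (ordered ++ (pvExpand preds seen front).2) := by
  intro front
  induction front with
  | nil => intro seen pending ordered; simp [pvExpand]
  | cons c f ih =>
    intro seen pending ordered
    simp only [List.cons_append, pvLoopC]
    have h1 : (f ++ pending) ++ (pvMark seen (pvSortedPreds preds c)).2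
        = f ++ (pending ++ (pvMark seen (pvSortedPreds preds c)).2) := by
      simp [List.append_assoc]
    rw [h1, ih]
    simp only [pvExpand]
    simp [List.append_assoc]

-- loop C equals the level loop
theorem pv_C_eq_B (preds : List (String × List String)) (U : List String)
    (hU : ∀ x ∈ preds.flatMap (fun kv => kv.2), x ∈ U) :
    ∀ (seen frontier ordered : List String),
      pvLoopC preds U hU seen frontier ordered = pvLoopB preds U hU seen frontier ordered := by
  intro seen frontier ordered
  induction seen, frontier, ordered using pvLoopB.induct preds U hU with
  | case1 seen ordered => simp [pvLoopC, pvLoopB]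
  | case2 seen ordered x xs _r ih =>
    have h0 : pvLoopC preds U hU seen (x :: xs) ordered
        = pvLoopC preds U hU seen ((x :: xs) ++ []) ordered := by simp
    rw [h0, pv_C_unroll]
    simp only [List.nil_append]
    rw [ih]
    conv_rhs => rw [pvLoopB]

-- ===== bridging B's fixed-point rounds to the level loop =====
theorem pvScan_eq_mark (ps : List String) : ∀ (live : List String),
    pvScan live ps = ((pvMark live ps).1, !(pvMark live ps).2.isEmpty) := by
  induction ps with
  | nil => intro live; simp [pvScan, pvMark]
  | cons p ps ih =>
    intro live
    by_cases hp : p ∈ live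
    · simp [pvScan, pvMark, hp, ih]
    · simp only [pvScan, pvMark, hp, if_false]
      rw [pv_set_add_of_not_mem live p hp]
      simp [ih (live ++ [p])]

theorem pvPass_eq_expand (preds : List (String × List String)) (f : List String) :
    ∀ (live : List String),
    pvPass preds live f = ((pvExpand preds live f).1, !(pvExpand preds live f).2.isEmpty) := by
  induction f with
  | nil => intro live; simp [pvPass, pvExpand]
  | cons node rest ih =>
    intro live
    simp only [pvPass, pvExpand, pvScan_eq_mark, ih]
    cases (pvMark live (pvSortedPreds preds node)).2 <;> simp

theorem pvScan_noop (ps : List String) (live : List String)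
    (h : ∀ p ∈ ps, p ∈ live) : pvScan live ps = (live, false) := by
  induction ps with
  | nil => simp [pvScan]
  | cons p ps ih =>
    have hp : p ∈ live := h p (List.mem_cons_self ..)
    simp only [pvScan, hp, if_true]
    exact ih (fun x hx => h x (List.mem_cons_of_mem _ hx))

theorem pvPass_noop (preds : List (String × List String)) (a : List String) :
    ∀ (live : List String), (∀ x ∈ a, ∀ p ∈ pvSortedPreds preds x, p ∈ live) →
      pvPass preds live a = (live, false) := by
  induction a with
  | nil => intro live _; simp [pvPass]
  | cons x xs ih =>
    intro live h
    simp only [pvPass]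
    rw [pvScan_noop _ live (h x (List.mem_cons_self ..))]
    simp [ih live (fun y hy => h y (List.mem_cons_of_mem _ hy))]

theorem pvPass_append (preds : List (String × List String)) (a : List String) :
    ∀ (b live : List String),
      pvPass preds live (a ++ b) =
        ((pvPass preds (pvPass preds live a).1 b).1,
         (pvPass preds live a).2 || (pvPass preds (pvPass preds live a).1 b).2) := by
  induction a with
  | nil => intro b live; simp [pvPass]
  | cons x xs ih =>
    intro b live
    simp only [List.cons_append, pvPass, ih]
    simp [Bool.or_assoc]

theorem pv_mark_covers (ps : List String) : ∀ (seen : List String),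
    ∀ p ∈ ps, p ∈ (pvMark seen ps).1 := by
  induction ps with
  | nil => simp
  | cons x xs ih =>
    intro seen p hp
    by_cases hx : x ∈ seen
    · rcases List.mem_cons.mp hp with rfl | hp'
      · rw [pv_mark_fst]; exact List.mem_append_left _ hx
      · simpa [pvMark, hx] using ih seen p hp'
    · simp only [pvMark, hx, if_false]
      rw [pv_set_add_of_not_mem seen x hx]
      rcases List.mem_cons.mp hp with rfl | hp'
      · rw [pv_mark_fst]
        exact List.mem_append_left _ (List.mem_append_right _ (List.mem_singleton.mpr rfl))
      · exact ih (seen ++ [x]) p hp'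

theorem pv_expand_covers (preds : List (String × List String)) (f : List String) :
    ∀ (seen : List String), ∀ node ∈ f, ∀ p ∈ pvSortedPreds preds node,
      p ∈ (pvExpand preds seen f).1 := by
  induction f with
  | nil => simp
  | cons x xs ih =>
    intro seen node hnode p hp
    simp only [pvExpand]
    rcases List.mem_cons.mp hnode with rfl | hn'
    · rw [pv_expand_fst]
      exact List.mem_append_left _ (pv_mark_covers _ seen p hp)
    · exact ih _ node hn' p hp

-- every pred scanned from the old list is present after the round
theorem pv_round_covers (preds : List (String × List String)) (U : List String)
    (hU : ∀ x ∈ preds.flatMap (fun kv => kv.2), x ∈ U)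
    (ordered o_prev F : List String) (hsplit : ordered = o_prev ++ F)
    (hinv : ∀ x ∈ o_prev, ∀ p ∈ pvSortedPreds preds x, p ∈ ordered) :
    ∀ x ∈ ordered, ∀ p ∈ pvSortedPreds preds x, p ∈ (pvExpand preds ordered F).1 := by
  intro x hx p hp
  rw [hsplit] at hx
  rcases List.mem_append.mp hx with h1 | h1
  · rw [pv_expand_fst]
    exact List.mem_append_left _ (hinv x h1 p hp)
  · exact pv_expand_covers preds F ordered x h1 p hp

-- one round of the fixed-point pass over ordered = o_prev ++ F equals pvExpand over F
theorem pv_round_eq (preds : List (String × List String))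
    (ordered o_prev F : List String) (hsplit : ordered = o_prev ++ F)
    (hinv : ∀ x ∈ o_prev, ∀ p ∈ pvSortedPreds preds x, p ∈ ordered) :
    pvPass preds ordered ordered =
      ((pvExpand preds ordered F).1, !(pvExpand preds ordered F).2.isEmpty) := by
  subst hsplit
  rw [pvPass_append]
  rw [pvPass_noop preds o_prev (o_prev ++ F) hinv]
  simp [pvPass_eq_expand]

-- one unfolding of the fixed-point loop as an if on the changed flag
theorem pvLoopD_step (preds : List (String × List String)) (U : List String)
    (hU : ∀ x ∈ preds.flatMap (fun kv => kv.2), x ∈ U) (ordered : List String) :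
    pvLoopD preds U hU ordered =
      (if (pvPass preds ordered ordered).2 then pvLoopD preds U hU (pvPass preds ordered ordered).1
       else (pvPass preds ordered ordered).1) := by
  rw [pvLoopD]
  split
  · rename_i o2 heq
    simp [heq]
  · rename_i o2 heq
    simp [heq]

-- B's fixed-point loop equals the level loop (with seen = ordered)
theorem pv_D_eq_B (preds : List (String × List String)) (U : List String)
    (hU : ∀ x ∈ preds.flatMap (fun kv => kv.2), x ∈ U) :
    ∀ (ordered : List String), ∀ (F o_prev : List String), ordered = o_prev ++ F →
      (∀ x ∈ o_prev, ∀ p ∈ pvSortedPreds preds x, p ∈ ordered) →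
      pvLoopD preds U hU ordered = pvLoopB preds U hU ordered F ordered := by
  intro ordered
  induction ordered using pvLoopD.induct preds U hU with
  | case1 ordered o' h ih =>
    intro F o_prev hsplit hinv
    have hpass := pv_round_eq preds ordered o_prev F hsplit hinv
    rw [hpass] at h
    obtain ⟨h1, h2⟩ := Prod.ext_iff.mp h
    dsimp only at h1 h2
    rcases hd : (pvExpand preds ordered F).2 with _ | ⟨y, ys⟩
    · rw [hd] at h2; simp at h2
    · rcases F with _ | ⟨x, xs⟩
      · simp [pvExpand] at hd
      · have hfst := pv_expand_fst preds ordered (x :: xs)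
        have hL : pvLoopD preds U hU ordered = pvLoopD preds U hU o' := by
          rw [pvLoopD_step, hpass, hd]
          simp [h1]
        rw [hL]
        conv_rhs => rw [pvLoopB]
        have ho' : o' = ordered ++ (pvExpand preds ordered (x :: xs)).2 := by
          rw [← h1, hfst]
        have hcov := pv_round_covers preds U hU ordered o_prev (x :: xs) hsplit hinv
        have hrec := ih (pvExpand preds ordered (x :: xs)).2 ordered ho'
          (fun z hz p hp => by rw [← h1]; exact hcov z hz p hp)
        rw [h1, ← ho']
        exact hrec
  | case2 ordered o' h =>
    intro F o_prev hsplit hinv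
    have hpass := pv_round_eq preds ordered o_prev F hsplit hinv
    rw [hpass] at h
    obtain ⟨h1, h2⟩ := Prod.ext_iff.mp h
    dsimp only at h1 h2
    have hd : (pvExpand preds ordered F).2 = [] := by
      rcases hde : (pvExpand preds ordered F).2 with _ | ⟨y, ys⟩
      · rfl
      · rw [hde] at h2; simp at h2
    have hfst : (pvExpand preds ordered F).1 = ordered := by
      rw [pv_expand_fst, hd]; simp
    have hL : pvLoopD preds U hU ordered = o' := by
      rw [pvLoopD_step, hpass, hd]
      simp [h1]
    rw [hL, ← h1, hfst]
    rcases F with _ | ⟨x, xs⟩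
    · simp [pvLoopB]
    · conv_rhs => rw [pvLoopB]
      simp [hd, hfst, pvLoopB]

-- ===== VERDICT (by name: the statement is the Claim_ definition above) =====
theorem upstream_closure_py_spec : Claim_equal_upstream_closure_py := by
  intro focus_cell_id preds _
  unfold Spec_upstream_closure_py upstream_closure_py upstream_closure_py_alt
  have hmark : pvMark ([] : List String) [focus_cell_id] = ([focus_cell_id], [focus_cell_id]) := by
    simp [pvMark, PySem.Set.add, PySem.Set.contains]
  have h1 : pvLoopA preds (pvU focus_cell_id preds)
      (fun x hx => List.mem_cons_of_mem _ hx) [] [focus_cell_id] []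
      (by intro x hx; simp only [List.mem_singleton] at hx; subst hx; exact List.mem_cons_self ..)
      = pvLoopB preds (pvU focus_cell_id preds)
        (fun x hx => List.mem_cons_of_mem _ hx) [focus_cell_id] [focus_cell_id] [focus_cell_id] := by
    rw [pv_A_eq_C, hmark]
    simpa using pv_C_eq_B preds (pvU focus_cell_id preds)
      (fun x hx => List.mem_cons_of_mem _ hx) [focus_cell_id] [focus_cell_id] [focus_cell_id]
  have h2 : pvLoopD preds (pvU focus_cell_id preds)
      (fun x hx => List.mem_cons_of_mem _ hx) [focus_cell_id]
      = pvLoopB preds (pvU focus_cell_id preds)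
        (fun x hx => List.mem_cons_of_mem _ hx) [focus_cell_id] [focus_cell_id] [focus_cell_id] :=
    pv_D_eq_B preds (pvU focus_cell_id preds)
      (fun x hx => List.mem_cons_of_mem _ hx) [focus_cell_id] [focus_cell_id] [] rfl (by simp)
  rw [h1, h2]
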